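-- pv_equiv track=rewrite | github.com/liudingyi-hub/test0002 | syncDbTransfer/src/tools.py | get_device_id
-- ===== SOURCE A (Python) =====
-- def get_device_id(id, pre='01001'):
--     str_id = str(id)
--     while 1:
--         if len(str_id) < 4:
--             str_id = '0' + str_id
--         else:
--             break
--     return pre+str_id
-- ===== SOURCE B (Python) =====
-- def get_device_id(id, pre='01001'):
--     str_id = str(id)
--     zeros = max(0, 4 - len(str_id))
--     return pre + '0' * zeros + str_id
-- ===== Notes on version B (the rewrite author's own statement) =====
-- stated objective: simpler
-- what changed: Replaces the unbounded while-loop that prepends one '0' per iteration with a closed-form computation of the padding width and a single string-multiply construction.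
import Mathlib
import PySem

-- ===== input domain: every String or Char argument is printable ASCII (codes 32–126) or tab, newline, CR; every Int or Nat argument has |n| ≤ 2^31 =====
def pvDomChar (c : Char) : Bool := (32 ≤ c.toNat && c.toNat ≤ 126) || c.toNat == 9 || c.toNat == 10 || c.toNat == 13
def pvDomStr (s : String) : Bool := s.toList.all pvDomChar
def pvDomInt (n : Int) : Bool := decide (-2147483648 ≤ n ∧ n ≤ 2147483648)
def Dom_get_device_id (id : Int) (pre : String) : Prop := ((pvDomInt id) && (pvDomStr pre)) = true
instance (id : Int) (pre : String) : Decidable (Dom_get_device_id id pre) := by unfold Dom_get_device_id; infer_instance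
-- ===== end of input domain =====

-- B changes: the while-loop prepending one '0' at a time is replaced by a closed-form
-- padding width max(0, 4 - len) and a single replicate (objective: simpler).

-- ===== PORT A =====
-- the while loop: prepend '0' while length < 4
def padLoopA (s : List Char) : List Char :=
  if s.length < 4 then padLoopA ('0' :: s) else s
  termination_by 4 - s.length

def get_device_id (id : Int) (pre : String) : String :=
  pre ++ String.mk (padLoopA (PySem.Int.toStr id).toList)

-- ===== PORT B =====
def get_device_id_alt (id : Int) (pre : String) : String :=
  let s := (PySem.Int.toStr id).toList
  let zeros : Int := max 0 (4 - (s.length : Int))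
  pre ++ String.mk (List.replicate zeros.toNat '0' ++ s)

-- ===== PRECONDITION & SPEC =====
def Spec_get_device_id (id : Int) (pre : String) (out : String) : Prop := out = get_device_id_alt id pre
instance (id : Int) (pre : String) (out : String) : Decidable (Spec_get_device_id id pre out) := by unfold Spec_get_device_id; infer_instance

-- ===== CLAIM (what is proved, stated in full; the proofs are below) =====
def Claim_equal_get_device_id : Prop := ∀ (id : Int) (pre : String), Dom_get_device_id id pre → Spec_get_device_id id pre (get_device_id id pre)

-- ===== LEMMAS AND PROOFS =====
theorem padLoopA_eq (s : List Char) : padLoopA s = List.replicate (4 - s.length) '0' ++ s := by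
  unfold padLoopA
  split
  · rename_i h
    rw [padLoopA_eq ('0' :: s)]
    have h4 : 4 - s.length = (4 - ('0' :: s).length) + 1 := by simp; omega
    rw [h4, List.replicate_succ']
    simp
  · rename_i h
    have : 4 - s.length = 0 := by omega
    simp [this]
  termination_by 4 - s.length

theorem toNat_max (n : Nat) : (max (0:Int) (4 - (n : Int))).toNat = 4 - n := by omega

-- ===== VERDICT (by name: the statement is the Claim_ definition above) =====
theorem get_device_id_spec : Claim_equal_get_device_id := by
  intro id pre _
  unfold Spec_get_device_id get_device_id get_device_id_alt
  simp [padLoopA_eq, toNat_max]
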